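-- pv_equiv track=rewrite | github.com/whitshisia/codility | Q1.py | check_a
-- ===== SOURCE A (Python) =====
-- def check_a(s):
--     b_encouter = False
--     for char in s:
--         if char == "b":
--             b_encouter = True
--         elif char == "a":
--              if b_encouter:
--                  return False
--
--     return True
-- ===== SOURCE B (Python) =====
-- def check_a(s):
--     t = [c for c in s if c in "ab"]
--     return t == sorted(t)
-- ===== Notes on version B (the rewrite author's own statement) =====
-- stated objective: alternative
-- what changed: Instead of scanning with a b-seen flag, B projects the string onto its 'a'/'b' subsequence and declares it valid iff that subsequence equals its sorted copy (all a's before b's).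
import Mathlib
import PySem

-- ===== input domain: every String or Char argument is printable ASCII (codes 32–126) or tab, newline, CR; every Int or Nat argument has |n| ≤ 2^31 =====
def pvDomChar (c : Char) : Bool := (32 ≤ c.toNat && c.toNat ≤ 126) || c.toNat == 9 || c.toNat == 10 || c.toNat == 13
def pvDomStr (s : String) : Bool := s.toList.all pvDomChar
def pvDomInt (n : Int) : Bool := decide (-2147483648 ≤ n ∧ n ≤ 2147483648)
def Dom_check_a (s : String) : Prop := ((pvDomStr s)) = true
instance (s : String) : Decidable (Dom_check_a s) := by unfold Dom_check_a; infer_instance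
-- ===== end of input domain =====

-- B replaces A's flag-carrying scan by a sort-based check: project the string onto
-- its 'a'/'b' subsequence and accept iff that subsequence equals its sorted copy.

-- ===== PORT A =====
-- the for-loop over s with the b_encouter flag and early return False
def check_a_loop : List Char → Bool → Bool
  | [], _ => true
  | c :: cs, flag =>
    if c = 'b' then check_a_loop cs true
    else if c = 'a' then
      (if flag then false else check_a_loop cs flag)
    else check_a_loop cs flag

def check_a (s : String) : Bool := check_a_loop s.toList false

-- ===== PORT B =====
-- t = [c for c in s if c in "ab"]; t == sorted(t)
-- (for a single char c, `c in "ab"` is c == 'a' or c == 'b')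
def check_a_alt (s : String) : Bool :=
  let t := s.toList.filter (fun c => c == 'a' || c == 'b')
  t == PySem.List.sorted t (fun c => c) false

-- ===== PRECONDITION & SPEC =====
def Spec_check_a (s : String) (out : Bool) : Prop := out = check_a_alt s
instance (s : String) (out : Bool) : Decidable (Spec_check_a s out) := by unfold Spec_check_a; infer_instance

-- ===== CLAIM (what is proved, stated in full; the proofs are below) =====
def Claim_equal_check_a : Prop := ∀ (s : String), Dom_check_a s → Spec_check_a s (check_a s)

-- ===== LEMMAS AND PROOFS =====

def abFilter (l : List Char) : List Char := l.filter (fun c => c == 'a' || c == 'b')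

theorem mem_abFilter (l : List Char) (x : Char) (h : x ∈ abFilter l) : x = 'a' ∨ x = 'b' := by
  have := List.of_mem_filter h
  simpa using this

-- once the flag is set, the loop returns true iff no 'a' remains
theorem check_a_loop_true (xs : List Char) :
    check_a_loop xs true = !(xs.contains 'a') := by
  induction xs with
  | nil => rfl
  | cons c cs ih =>
    simp only [check_a_loop]
    by_cases hb : c = 'b'
    · subst hb; simp [ih]
    · by_cases ha : c = 'a'
      · subst ha; simp
      · rw [if_neg hb, if_neg ha, ih]
        simp [Ne.symm ha]

-- the loop (flag clear) accepts exactly the strings whose 'a'/'b' subsequence is ordered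
theorem check_a_loop_iff_pairwise (l : List Char) :
    check_a_loop l false = true ↔ (abFilter l).Pairwise (· ≤ ·) := by
  induction l with
  | nil => simp [check_a_loop, abFilter]
  | cons c cs ih =>
    by_cases hb : c = 'b'
    · subst hb
      have h1 : check_a_loop ('b' :: cs) false = check_a_loop cs true := by
        simp [check_a_loop]
      have hf : abFilter ('b' :: cs) = 'b' :: abFilter cs := by simp [abFilter]
      rw [h1, check_a_loop_true, hf, List.pairwise_cons]
      constructor
      · intro hno
        have hnoa : 'a' ∉ cs := by simpa using hno
        have hall : ∀ x ∈ abFilter cs, x = 'b' := by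
          intro x hx
          rcases mem_abFilter cs x hx with h | h
          · exact absurd (by simpa [h] using List.mem_of_mem_filter hx) hnoa
          · exact h
        refine ⟨fun x hx => by rw [hall x hx], ?_⟩
        exact List.pairwise_of_forall_mem_list
          (fun a ha b hbm => by rw [hall a ha, hall b hbm])
      · rintro ⟨hle, -⟩
        simp only [Bool.not_eq_eq_eq_not, Bool.not_true, List.contains_eq_mem,
          decide_eq_false_iff_not]
        intro hacs
        have hmem : 'a' ∈ abFilter cs := by
          simp [abFilter, List.mem_filter, hacs]
        exact absurd (hle 'a' hmem) (by decide)
    · by_cases ha : c = 'a'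
      · subst ha
        have h1 : check_a_loop ('a' :: cs) false = check_a_loop cs false := by
          simp [check_a_loop]
        have hf : abFilter ('a' :: cs) = 'a' :: abFilter cs := by simp [abFilter]
        rw [h1, hf, List.pairwise_cons, ih]
        constructor
        · intro hp
          refine ⟨fun x hx => ?_, hp⟩
          rcases mem_abFilter cs x hx with h | h <;> rw [h] <;> decide
        · exact fun h => h.2
      · have h1 : check_a_loop (c :: cs) false = check_a_loop cs false := by
          simp [check_a_loop, ha, hb]
        have hf : abFilter (c :: cs) = abFilter cs := by
          simp [abFilter, ha, hb]
        rw [h1, hf, ih]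

-- ===== VERDICT (by name: the statement is the Claim_ definition above) =====
theorem check_a_spec : Claim_equal_check_a := by
  intro s _
  unfold Spec_check_a check_a check_a_alt
  set t := s.toList.filter (fun c => c == 'a' || c == 'b') with ht
  have htab : t = abFilter s.toList := rfl
  by_cases h : check_a_loop s.toList false = true
  · rw [h]
    have hp : t.Pairwise (· ≤ ·) := by
      rw [htab]; exact (check_a_loop_iff_pairwise s.toList).mp h
    have := PySem.List.sorted_eq_self_of_pairwise (xs := t) (key := fun c => c) hp
    simp [this]
  · rw [Bool.not_eq_true] at h
    rw [h]
    symm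
    rw [beq_eq_false_iff_ne]
    intro heq
    apply absurd _ (h ▸ Bool.false_ne_true)
    rw [check_a_loop_iff_pairwise, ← htab]
    have := PySem.List.sorted_pairwise (xs := t) (key := fun c => c)
    rw [← heq] at this
    exact this
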